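-- pv_equiv track=rewrite | github.com/JMCinJiangSu/PharmReport | customize_filters.py | filter_xw1404_dna
-- ===== SOURCE A (Python) =====
-- def filter_xw1404_dna(var_list):
-- 	dna_rule = ['ALK', 'BRAF', 'CDKN2A', 'EGFR', 'ERBB2', 'KRAS', 'MTAP', 'MET', 'NTRK1', 'NTRK2', 'NTRK3', 'RET', 'ROS1']
-- 	result = []
-- 	detect_gene = []
-- 	for var in var_list:
-- 		if var['gene_symbol'] in dna_rule:
-- 			detect_gene.append(var['gene_symbol'])
-- 			result.append(var)
-- 	for gene in sorted(set(dna_rule) - set(detect_gene)):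
-- 		result.append({
-- 			"gene_symbol" : gene,
-- 			"bio_category" : ""
-- 		})
--
-- 	return sorted(result, key = lambda i:dna_rule.index(i["gene_symbol"]))
-- ===== SOURCE B (Python) =====
-- def filter_xw1404_dna(var_list):
-- 	dna_rule = ['ALK', 'BRAF', 'CDKN2A', 'EGFR', 'ERBB2', 'KRAS', 'MTAP', 'MET', 'NTRK1', 'NTRK2', 'NTRK3', 'RET', 'ROS1']
-- 	groups = {}
-- 	for var in var_list:
-- 		gene = var['gene_symbol']
-- 		if gene in dna_rule:
-- 			groups.setdefault(gene, []).append(var)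
-- 	result = []
-- 	for gene in dna_rule:
-- 		if gene in groups:
-- 			result += groups[gene]
-- 		else:
-- 			result.append({"gene_symbol": gene, "bio_category": ""})
-- 	return result
-- ===== Notes on version B (the rewrite author's own statement) =====
-- stated objective: simpler
-- what changed: B replaces A's three phases (filter+collect detected genes, set-difference for missing genes with an alphabetical sort, then a final stable sort by rule index) with a single grouping dict built in one pass and a direct assembly pass over dna_rule in its fixed order, eliminating both sorts and the set difference.
import Mathlib
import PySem

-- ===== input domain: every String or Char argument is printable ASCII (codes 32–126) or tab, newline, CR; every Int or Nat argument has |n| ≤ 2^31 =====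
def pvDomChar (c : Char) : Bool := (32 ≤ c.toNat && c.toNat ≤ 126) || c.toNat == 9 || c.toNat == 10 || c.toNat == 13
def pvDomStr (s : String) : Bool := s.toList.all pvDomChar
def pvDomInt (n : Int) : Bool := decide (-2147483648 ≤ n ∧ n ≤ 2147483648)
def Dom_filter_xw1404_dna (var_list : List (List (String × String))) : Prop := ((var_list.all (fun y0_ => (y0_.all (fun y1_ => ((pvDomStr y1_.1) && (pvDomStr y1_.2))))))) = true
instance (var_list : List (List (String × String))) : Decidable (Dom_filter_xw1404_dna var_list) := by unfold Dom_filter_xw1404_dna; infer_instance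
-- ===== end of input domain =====

-- B groups variants per gene in one dict pass and emits them in rule order directly,
-- replacing A's set-difference + alphabetical pass + final stable sort (objective: simpler).


-- shared literal constants / dict-lookup helper (both Pythons contain the same literals)
def dnaRule : List String :=
  ["ALK", "BRAF", "CDKN2A", "EGFR", "ERBB2", "KRAS", "MTAP", "MET", "NTRK1", "NTRK2", "NTRK3", "RET", "ROS1"]

-- var['gene_symbol']: first-match association-list lookup (total form; Pre_ guarantees the key is present)
def geneOf (v : List (String × String)) : String := (List.lookup "gene_symbol" v).getD ""

-- {"gene_symbol": g, "bio_category": ""}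
def phVar (g : String) : List (String × String) := [("gene_symbol", g), ("bio_category", "")]

-- dna_rule.index(g) (total form; every looked-up gene is in dna_rule)
def ruleIdx (g : String) : Nat := (PySem.List.index? dnaRule g).getD 0

-- ===== PORT A =====
def filter_xw1404_dna (var_list : List (List (String × String))) : List (List (String × String)) :=
  -- first loop: state (result, detect_gene)
  let s := var_list.foldl
    (fun (s : List (List (String × String)) × List String) v =>
      if geneOf v ∈ dnaRule then (s.1 ++ [v], s.2 ++ [geneOf v]) else s)
    ([], [])
  -- for gene in sorted(set(dna_rule) - set(detect_gene)): result.append(placeholder)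
  let missing := PySem.List.sorted
    (PySem.Set.diff (PySem.Set.ofList dnaRule) (PySem.Set.ofList s.2)) (fun g => g) false
  let result := missing.foldl (fun acc g => acc ++ [phVar g]) s.1
  -- sorted(result, key=lambda i: dna_rule.index(i["gene_symbol"]))
  PySem.List.sorted result (fun i => ruleIdx (geneOf i)) false

-- ===== PORT B =====
def filter_xw1404_dna_alt (var_list : List (List (String × String))) : List (List (String × String)) :=
  -- one pass: group detected variants by gene (insertion-ordered dict of lists)
  let groups : PySem.Dict String (List (List (String × String))) :=
    var_list.foldl
      (fun d v => if geneOf v ∈ dnaRule then d.modify (geneOf v) [] (· ++ [v]) else d)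
      PySem.Dict.empty
  -- second pass: assemble directly in rule order
  dnaRule.foldl
    (fun acc g => if groups.contains g then acc ++ groups.getD g [] else acc ++ [phVar g]) []

-- ===== PRECONDITION & SPEC =====
-- Pre_ excludes exactly the inputs where some variant dict lacks the key 'gene_symbol',
-- on which the Python A raises KeyError.
def Pre_filter_xw1404_dna (var_list : List (List (String × String))) : Prop :=
  ∀ v ∈ var_list, (List.lookup "gene_symbol" v).isSome = true
instance (var_list : List (List (String × String))) : Decidable (Pre_filter_xw1404_dna var_list) := by
  unfold Pre_filter_xw1404_dna; infer_instance

def pvWitness_filter_xw1404_dna : (List (List (String × String))) :=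
  [[("gene_symbol", "EGFR"), ("bio_category", "snv")], [("gene_symbol", "TP53")]]

def Spec_filter_xw1404_dna (var_list : List (List (String × String))) (out : List (List (String × String))) : Prop := out = filter_xw1404_dna_alt var_list
instance (var_list : List (List (String × String))) (out : List (List (String × String))) : Decidable (Spec_filter_xw1404_dna var_list out) := by unfold Spec_filter_xw1404_dna; infer_instance

-- ===== CLAIM (what is proved, stated in full; the proofs are below) =====
def Claim_equal_filter_xw1404_dna : Prop := ∀ (var_list : List (List (String × String))), Dom_filter_xw1404_dna var_list → Pre_filter_xw1404_dna var_list → Spec_filter_xw1404_dna var_list (filter_xw1404_dna var_list)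

-- ===== LEMMAS AND PROOFS =====

-- the common normal form both ports are reduced to: per rule gene, its variants in
-- original order, or a placeholder when there are none
def commonForm (var_list : List (List (String × String))) : List (List (String × String)) :=
  dnaRule.flatMap (fun g =>
    let F := var_list.filter (fun v => decide (geneOf v = g))
    if F = [] then [phVar g] else F)

lemma insertBy_append_left {α : Type} (before : α → α → Bool) (x : α) (A B : List α)
    (h : ∀ y ∈ A, before x y = false) :
    PySem.List.insertBy before x (A ++ B) = A ++ PySem.List.insertBy before x B := by
  induction A with
  | nil => simp
  | cons a A ih =>
    simp only [List.cons_append, PySem.List.insertBy, h a (List.mem_cons_self ..)]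
    simp only [Bool.false_eq_true, if_false, List.cons.injEq, true_and]
    exact ih fun y hy => h y (List.mem_cons_of_mem _ hy)

lemma insertBy_all_before {α : Type} (before : α → α → Bool) (x : α) (B : List α)
    (h : ∀ y ∈ B, before x y = true) :
    PySem.List.insertBy before x B = x :: B := by
  cases B with
  | nil => rfl
  | cons b B => simp [PySem.List.insertBy, h b (List.mem_cons_self ..)]

-- stable sort of a list whose keys all lie in a strictly increasing key list ks
-- is the concatenation, over ks, of the equal-key groups in original order
lemma sorted_eq_flatMap_groups {α κ : Type} [LinearOrder κ] (key : α → κ) (ks : List κ)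
    (hks : ks.Pairwise (· < ·)) (l : List α) (hl : ∀ x ∈ l, key x ∈ ks) :
    PySem.List.sorted l key false = ks.flatMap (fun k => l.filter (fun x => decide (key x = k))) := by
  induction l using List.reverseRecOn with
  | nil => simp [PySem.List.sorted_eq_foldl_insertBy]
  | append_singleton p x ih =>
    have hx : key x ∈ ks := hl x (by simp)
    obtain ⟨A, B, rfl⟩ := List.append_of_mem hx
    have hp : ∀ y ∈ p, key y ∈ A ++ key x :: B := fun y hy => hl y (by simp [hy])
    have hA : ∀ a ∈ A, a < key x := by
      have := (List.pairwise_append.mp hks).2.2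
      intro a ha; exact this a ha (key x) (by simp)
    have hB : ∀ b ∈ B, key x < b := by
      have := ((List.pairwise_append.mp hks).2.1)
      exact (List.pairwise_cons.mp this).1
    rw [PySem.List.sorted_eq_foldl_insertBy] at *
    rw [List.foldl_append, List.foldl_cons, List.foldl_nil, ih hp]
    have memA : ∀ k ∈ A, ∀ y ∈ p.filter (fun z => decide (key z = k)), key y = k := by
      intro k _ y hy; exact of_decide_eq_true (List.mem_filter.mp hy).2
    -- LHS: insert x after all groups with key ≤ key x
    rw [List.flatMap_append, List.flatMap_cons, ← List.append_assoc]
    rw [insertBy_append_left _ x _ _ (by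
      intro y hy
      rcases List.mem_append.mp hy with h1 | h2
      · obtain ⟨k, hk, hyk⟩ := List.mem_flatMap.mp h1
        have : key y = k := memA k hk y hyk
        simp [this]; exact (hA k hk).le
      · have : key y = key x := of_decide_eq_true (List.mem_filter.mp h2).2
        simp [this])]
    rw [insertBy_all_before _ x _ (by
      intro y hy
      obtain ⟨k, hk, hyk⟩ := List.mem_flatMap.mp hy
      have : key y = k := of_decide_eq_true (List.mem_filter.mp hyk).2
      simp [this]; exact hB k hk)]
    -- RHS: the group of key x gains x at its end
    rw [List.flatMap_append, List.flatMap_cons]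
    have fA : A.flatMap (fun k => (p ++ [x]).filter (fun z => decide (key z = k)))
        = A.flatMap (fun k => p.filter (fun z => decide (key z = k))) := by
      apply List.flatMap_congr
      intro k hk
      rw [List.filter_append]
      have : key x ≠ k := ne_of_gt (hA k hk)
      simp [this]
    have fB : B.flatMap (fun k => (p ++ [x]).filter (fun z => decide (key z = k)))
        = B.flatMap (fun k => p.filter (fun z => decide (key z = k))) := by
      apply List.flatMap_congr
      intro k hk
      rw [List.filter_append]
      have : key x ≠ k := ne_of_lt (hB k hk)
      simp [this]
    rw [fA, fB, List.filter_append]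
    simp

lemma filter_eq_nodup {α : Type} [DecidableEq α] (l : List α) (hl : l.Nodup) (a : α) :
    l.filter (fun x => decide (x = a)) = if a ∈ l then [a] else [] := by
  induction l with
  | nil => simp
  | cons b l ih =>
    rcases List.nodup_cons.mp hl with ⟨hb, hl'⟩
    by_cases h : b = a
    · subst h
      simp [hb, ih hl']
    · simp [h, ih hl', Ne.symm h]

lemma ruleIdx_inj : ∀ a ∈ dnaRule, ∀ b ∈ dnaRule, ruleIdx a = ruleIdx b → a = b := by decide

lemma rule_pairwise : (dnaRule.map ruleIdx).Pairwise (· < ·) := by decide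

lemma geneOf_phVar (g : String) : geneOf (phVar g) = g := by
  simp [geneOf, phVar]

-- the detected-variants filter, restricted to one rule gene, over the whole input
lemma filter_detect (var_list : List (List (String × String))) (g : String) (hg : g ∈ dnaRule) :
    (var_list.filter (fun v => decide (geneOf v ∈ dnaRule))).filter (fun v => decide (geneOf v = g))
      = var_list.filter (fun v => decide (geneOf v = g)) := by
  rw [List.filter_filter]
  apply List.filter_congr
  intro v _
  by_cases h : geneOf v = g
  · simp [h, hg]
  · simp [h]

-- membership in detect ↔ the gene's group is nonempty
lemma mem_detect_iff (var_list : List (List (String × String))) (g : String) (hg : g ∈ dnaRule) :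
    (g ∈ (var_list.filter (fun v => decide (geneOf v ∈ dnaRule))).map geneOf)
      ↔ var_list.filter (fun v => decide (geneOf v = g)) ≠ [] := by
  rw [← filter_detect var_list g hg]
  constructor
  · rintro h hnil
    obtain ⟨v, hv, rfl⟩ := List.mem_map.mp h
    have : v ∈ (var_list.filter (fun v => decide (geneOf v ∈ dnaRule))).filter
        (fun w => decide (geneOf w = geneOf v)) := List.mem_filter.mpr ⟨hv, by simp⟩
    rw [hnil] at this; exact absurd this (List.not_mem_nil)
  · intro h
    obtain ⟨v, hv⟩ := List.exists_mem_of_ne_nil _ h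
    have := List.mem_filter.mp hv
    exact List.mem_map.mpr ⟨v, this.1, of_decide_eq_true this.2⟩

lemma pair_loop (l : List (List (String × String)))
    (acc : List (List (String × String)) × List String) :
    l.foldl (fun s v => if geneOf v ∈ dnaRule then (s.1 ++ [v], s.2 ++ [geneOf v]) else s) acc
      = (acc.1 ++ l.filter (fun v => decide (geneOf v ∈ dnaRule)),
         acc.2 ++ (l.filter (fun v => decide (geneOf v ∈ dnaRule))).map geneOf) := by
  induction l generalizing acc with
  | nil => simp
  | cons v l ih =>
    by_cases h : geneOf v ∈ dnaRule
    · simp [h, ih]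
    · simp [h, ih]

lemma a_eq_commonForm (var_list : List (List (String × String))) :
    filter_xw1404_dna var_list = commonForm var_list := by
  simp only [filter_xw1404_dna]
  -- split the two accumulators of the first loop
  rw [pair_loop var_list ([], [])]
  rw [PySem.List.foldl_append_singleton_eq_map]
  simp only [List.nil_append]
  set filtered := var_list.filter (fun v => decide (geneOf v ∈ dnaRule)) with hf
  set detect := filtered.map geneOf with hd
  set missing := PySem.List.sorted
    (PySem.Set.diff (PySem.Set.ofList dnaRule) (PySem.Set.ofList detect)) (fun g => g) false
    with hm
  have hmissing_mem : ∀ g, g ∈ missing ↔ g ∈ dnaRule ∧ g ∉ detect := by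
    intro g
    rw [hm, PySem.List.mem_sorted, PySem.Set.mem_diff, PySem.Set.mem_ofList, PySem.Set.mem_ofList]
  have hmissing_nodup : missing.Nodup := by
    refine ((PySem.List.sorted_perm _ _ _).nodup_iff).mpr ?_
    exact List.Nodup.filter _ (PySem.Set.nodup_ofList dnaRule)
  -- apply the stable-sort grouping lemma
  rw [sorted_eq_flatMap_groups (fun i => ruleIdx (geneOf i)) (dnaRule.map ruleIdx)
      rule_pairwise _ (by
        intro x hx
        rcases List.mem_append.mp hx with h1 | h2
        · have := of_decide_eq_true (List.mem_filter.mp h1).2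
          exact List.mem_map.mpr ⟨geneOf x, this, rfl⟩
        · obtain ⟨g, hg, rfl⟩ := List.mem_map.mp h2
          have := ((hmissing_mem g).mp hg).1
          exact List.mem_map.mpr ⟨g, this, by simp [geneOf_phVar]⟩)]
  rw [List.flatMap_map]
  unfold commonForm
  apply List.flatMap_congr
  intro g hg
  rw [List.filter_append]
  have hfiltered : filtered.filter (fun x => decide (ruleIdx (geneOf x) = ruleIdx g))
      = var_list.filter (fun v => decide (geneOf v = g)) := by
    rw [← filter_detect var_list g hg, hf]
    apply List.filter_congr
    intro v hv
    have hvr : geneOf v ∈ dnaRule := of_decide_eq_true (List.mem_filter.mp hv).2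
    by_cases h : geneOf v = g
    · simp [h]
    · have : ruleIdx (geneOf v) ≠ ruleIdx g := fun he => h (ruleIdx_inj _ hvr _ hg he)
      simp [h, this]
  have hph : (missing.map phVar).filter (fun x => decide (ruleIdx (geneOf x) = ruleIdx g))
      = if g ∈ missing then [phVar g] else [] := by
    rw [List.filter_map]
    have : (missing.filter ((fun x => decide (ruleIdx (geneOf x) = ruleIdx g)) ∘ phVar))
        = missing.filter (fun g' => decide (g' = g)) := by
      apply List.filter_congr
      intro g' hg'
      have hg'r : g' ∈ dnaRule := ((hmissing_mem g').mp hg').1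
      simp only [Function.comp, geneOf_phVar]
      by_cases h : g' = g
      · simp [h]
      · have : ruleIdx g' ≠ ruleIdx g := fun he => h (ruleIdx_inj _ hg'r _ hg he)
        simp [h, this]
    rw [this, filter_eq_nodup missing hmissing_nodup g]
    by_cases h : g ∈ missing <;> simp [h]
  rw [hfiltered, hph]
  have hmg : g ∈ missing ↔ var_list.filter (fun v => decide (geneOf v = g)) = [] := by
    rw [hmissing_mem g]
    constructor
    · intro ⟨_, h⟩
      by_contra hne
      exact h ((mem_detect_iff var_list g hg).mpr hne)
    · intro h
      exact ⟨hg, fun hmem => (mem_detect_iff var_list g hg).mp hmem h⟩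
  by_cases h : var_list.filter (fun v => decide (geneOf v = g)) = []
  · simp [h, hmg.mpr h]
  · have : g ∉ missing := fun hm' => h (hmg.mp hm')
    simp [h, this]

lemma b_eq_commonForm (var_list : List (List (String × String))) :
    filter_xw1404_dna_alt var_list = commonForm var_list := by
  simp only [filter_xw1404_dna_alt]
  set filtered := var_list.filter (fun v => decide (geneOf v ∈ dnaRule)) with hf
  set groups := var_list.foldl
      (fun d v => if geneOf v ∈ dnaRule then d.modify (geneOf v) [] (· ++ [v]) else d)
      PySem.Dict.empty with hgr
  have hloop : groups = filtered.foldl (fun d v => d.modify (geneOf v) [] (· ++ [v])) PySem.Dict.empty := by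
    rw [hgr, hf]
    exact PySem.List.foldl_ite_eq_foldl_filter (fun v => geneOf v ∈ dnaRule)
      (fun d v => d.modify (geneOf v) [] (· ++ [v])) var_list PySem.Dict.empty
  have hgetD : ∀ g, groups.getD g [] = filtered.filter (fun v => geneOf v == g) := by
    intro g
    have hmap : (filtered.map (fun v => ((geneOf v, v) : String × List (String × String)))).foldl
        (fun (d : PySem.Dict String (List (List (String × String)))) p => d.modify p.1 [] (· ++ [p.2]))
        PySem.Dict.empty
        = filtered.foldl (fun d v => d.modify (geneOf v) [] (· ++ [v])) PySem.Dict.empty :=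
      List.foldl_map
    rw [hloop, ← hmap, PySem.Dict.getD_foldl_modify_append]
    rw [List.filter_map]
    simp [Function.comp_def]
  have hcontains : ∀ g, groups.contains g = true ↔ g ∈ filtered.map geneOf := by
    intro g
    rw [hloop, PySem.Dict.contains_iff_mem_keys]
    rw [PySem.Dict.keys_foldl_modify_key filtered geneOf [] (fun _ v => (· ++ [v]))]
    constructor
    · intro h
      rcases (PySem.Set.mem_update _ _ _).mp h with h1 | h2
      · exact absurd h1 (List.not_mem_nil)
      · exact h2
    · intro h; exact (PySem.Set.mem_update _ _ _).mpr (Or.inr h)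
  have houter : List.foldl
      (fun acc g => if groups.contains g = true then acc ++ groups.getD g [] else acc ++ [phVar g])
      [] dnaRule
      = List.foldl (fun acc g => acc ++ (if groups.contains g = true then groups.getD g [] else [phVar g])) [] dnaRule := by
    apply PySem.List.foldl_congr_mem
    intro acc g _
    by_cases h : groups.contains g = true <;> simp [h]
  rw [houter, PySem.List.foldl_append_eq_flatMap, List.nil_append]
  unfold commonForm
  apply List.flatMap_congr
  intro g hg
  have hfg : filtered.filter (fun v => geneOf v == g) = var_list.filter (fun v => decide (geneOf v = g)) := by
    rw [← filter_detect var_list g hg, hf]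
    apply List.filter_congr
    intro v _
    by_cases h : geneOf v = g <;> simp [h]
  by_cases h : var_list.filter (fun v => decide (geneOf v = g)) = []
  · have hc : ¬ groups.contains g = true := by
      rw [hcontains g]
      intro hmem
      exact (mem_detect_iff var_list g hg).mp hmem h
    simp [hc, h]
  · have hc : groups.contains g = true :=
      (hcontains g).mpr ((mem_detect_iff var_list g hg).mpr h)
    simp [hc, h, hgetD g, hfg]

-- ===== VERDICT (by name: the statement is the Claim_ definition above) =====
theorem filter_xw1404_dna_spec : Claim_equal_filter_xw1404_dna := by
  intro var_list _ _
  unfold Spec_filter_xw1404_dna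
  rw [a_eq_commonForm, b_eq_commonForm]
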